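-- pv_equiv track=rewrite | github.com/joaoabreu5/PL-TPCs | TPC2/TPC2.py | parse
-- ===== SOURCE A (Python) =====
-- def parse(text):
--     numbers = []
--     state_on = True
--     last_3_chars = ""
--
--     i = 0
--     for line in text:
--         for char in line:
--             if state_on is True:
--                 if char.isnumeric():
--                     if i == len(numbers):
--                         numbers.append("")
--                     if i < len(numbers):
--                         numbers[i] += char
--                 else:
--                     if char == '=':
--                         numbers.append('=')
--                         i += 1
--                     if i < len(numbers) and numbers[i] != "":
--                         i += 1
--
--             if len(last_3_chars) < 3:
--                 last_3_chars += char
--             else: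
--                 last_3_chars = last_3_chars[1:3] + char
--
--             if last_3_chars.lower() == "off":
--                 state_on = False
--             elif last_3_chars.lower() == "on" or last_3_chars[1:3].lower() == "on":
--                 state_on = True
--
--     return numbers
-- ===== SOURCE B (Python) =====
-- def parse(text):
--     # Pass 1: collect exactly the characters that are read while the toggle is on.
--     chars = [c for line in text for c in line]
--     kept = []
--     on = True
--     w = ""
--     for c in chars:
--         if on:
--             kept.append(c)
--         w = (w + c)[-3:]
--         wl = w.lower()
--         if wl == "off":
--             on = False
--         elif wl.endswith("on"):
--             on = True
--     # Pass 2: no cursor/mutation bookkeeping -- mask the kept characters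
--     # (digits stay, '=' becomes a padded token, everything else a space) and split.
--     masked = "".join(" = " if c == "=" else (c if c.isnumeric() else " ") for c in kept)
--     return masked.split()
-- ===== Notes on version B (the rewrite author's own statement) =====
-- stated objective: alternative
-- what changed: A tokenizes on the fly with an append-then-mutate numbers list and a separately maintained cursor i inside the toggle loop; B splits the work into two staged passes: pass 1 only records the characters read while the toggle is on, pass 2 extracts tokens with no incremental building at all, by masking those characters (digits kept, '=' padded with spaces, everything else a space) and whitespace-splitting the masked string.
import Mathlib
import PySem

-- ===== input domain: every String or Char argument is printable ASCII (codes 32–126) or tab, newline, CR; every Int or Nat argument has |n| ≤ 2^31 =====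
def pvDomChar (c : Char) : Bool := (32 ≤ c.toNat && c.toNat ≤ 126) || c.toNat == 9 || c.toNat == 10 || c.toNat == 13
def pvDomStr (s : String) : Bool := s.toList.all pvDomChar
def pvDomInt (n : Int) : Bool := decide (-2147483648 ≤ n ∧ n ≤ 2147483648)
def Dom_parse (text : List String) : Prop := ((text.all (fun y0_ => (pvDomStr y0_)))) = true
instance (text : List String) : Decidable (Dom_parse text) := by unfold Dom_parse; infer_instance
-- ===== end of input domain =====

-- B replaces A's single-loop cursor-and-mutation tokenizer by two staged passes: first collect the
-- characters read while the toggle is on, then extract tokens by masking them and whitespace-splitting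
-- (objective: simpler decomposition, same O(n) cost).

-- ===== PORT A =====
-- State: (numbers, i, state_on, last_3_chars).  Python's `i` is a counter starting at 0 and only
-- ever incremented, so it is ported as Nat.  `char.isnumeric()` on the printable-ASCII domain is
-- exactly PySem.Chars.isdigit.  `last_3_chars` (a Python str built by slicing) is ported as
-- List Char; its slice `[1:3]` is PySem.List.slice, `.lower()` is PySem.Chars.lower.
def parseStepA (s : List String × Nat × Bool × List Char) (c : Char) :
    List String × Nat × Bool × List Char :=
  let numbers := s.1
  let i := s.2.1
  let state_on := s.2.2.1
  let w := s.2.2.2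
  let t : List String × Nat :=
    if state_on then
      if PySem.Chars.isdigit c then
        let n1 := if i = numbers.length then numbers ++ [""] else numbers
        let n2 := if i < n1.length then n1.set i (n1.getD i "" ++ c.toString) else n1
        (n2, i)
      else
        let t0 : List String × Nat := if c = '=' then (numbers ++ ["="], i + 1) else (numbers, i)
        let i1 := if t0.2 < t0.1.length ∧ t0.1.getD t0.2 "" ≠ "" then t0.2 + 1 else t0.2
        (t0.1, i1)
    else (numbers, i)
  let w1 := if w.length < 3 then w ++ [c] else PySem.List.slice w (some 1) (some 3) ++ [c]
  let low := PySem.Chars.lower w1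
  let state1 :=
    if low = "off".toList then false
    else if low = "on".toList ∨ PySem.Chars.lower (PySem.List.slice w1 (some 1) (some 3)) = "on".toList then true
    else state_on
  (t.1, t.2, state1, w1)

def parse (text : List String) : List String :=
  (text.foldl (fun s line => line.toList.foldl parseStepA s) ([], 0, true, [])).1

-- ===== PORT B =====
-- Pass 1 state: (kept, on, w).  `(w + c)[-3:]` is PySem.List.slice with -3, `.endswith("on")` is
-- PySem.Chars.endswith.  `kept.append(c)` under `if on`.
def parseStepK (s : List Char × Bool × List Char) (c : Char) :
    List Char × Bool × List Char :=
  let kept := if s.2.1 then s.1 ++ [c] else s.1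
  let w1 := PySem.List.slice (s.2.2 ++ [c]) (some (-3)) none
  let wl := PySem.Chars.lower w1
  let on1 :=
    if wl = "off".toList then false
    else if PySem.Chars.endswith wl "on".toList then true
    else s.2.1
  (kept, on1, w1)

-- `" = " if c == "=" else (c if c.isnumeric() else " ")`
def parseMask1 (c : Char) : List Char :=
  if c = '=' then [' ', '=', ' '] else if PySem.Chars.isdigit c then [c] else [' ']

def parse_alt (text : List String) : List String :=
  let chars := text.flatMap String.toList
  let kept := (chars.foldl parseStepK ([], true, [])).1
  let masked := kept.flatMap parseMask1
  (PySem.Chars.split₀ masked).map String.ofList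

-- ===== PRECONDITION & SPEC =====
def Spec_parse (text : List String) (out : List String) : Prop := out = parse_alt text
instance (text : List String) (out : List String) : Decidable (Spec_parse text out) := by unfold Spec_parse; infer_instance

-- ===== CLAIM (what is proved, stated in full; the proofs are below) =====
def Claim_equal_parse : Prop := ∀ (text : List String), Dom_parse text → Spec_parse text (parse text)

-- ===== LEMMAS AND PROOFS =====

-- Intermediate machine used only by the proof: tokens accumulated as (out, cur) plus the same
-- toggle (on, w).  It mediates between A's cursor machine and B's mask-and-split extraction.
def pvStepM (s : List String × String × Bool × List Char) (c : Char) :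
    List String × String × Bool × List Char :=
  let out := s.1
  let cur := s.2.1
  let state_on := s.2.2.1
  let w := s.2.2.2
  let t : List String × String :=
    if state_on then
      if PySem.Chars.isdigit c then (out, cur ++ c.toString)
      else
        let t0 : List String × String := if cur ≠ "" then (out ++ [cur], "") else (out, cur)
        let out1 := if c = '=' then t0.1 ++ ["="] else t0.1
        (out1, t0.2)
    else (out, cur)
  let w1 := PySem.List.slice (w ++ [c]) (some (-3)) none
  let wl := PySem.Chars.lower w1
  let state1 :=
    if wl = "off".toList then false
    else if PySem.Chars.endswith wl "on".toList then true
    else state_on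
  (t.1, t.2, state1, w1)

def pvMResult (text : List String) : List String :=
  let s := text.foldl (fun s line => line.toList.foldl pvStepM s) ([], "", true, [])
  if s.2.1 ≠ "" then s.1 ++ [s.2.1] else s.1

-- The simulation relation between A's and the intermediate machine's loop states.
def PvRel (a : List String × Nat × Bool × List Char)
    (b : List String × String × Bool × List Char) : Prop :=
  a.1 = b.1 ++ (if b.2.1 = "" then [] else [b.2.1]) ∧
  a.2.1 = b.1.length ∧
  a.2.2.1 = b.2.2.1 ∧
  a.2.2.2 = b.2.2.2 ∧
  b.2.2.2.length ≤ 3 ∧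
  (b.2.2.1 = false → b.2.1 = "")

theorem pv_window_eq (w : List Char) (h : w.length ≤ 3) (c : Char) :
    (if w.length < 3 then w ++ [c] else PySem.List.slice w (some 1) (some 3) ++ [c])
      = PySem.List.slice (w ++ [c]) (some (-3)) none := by
  rcases w with _|⟨a,_|⟨b,_|⟨d,_|⟨e,w⟩⟩⟩⟩
  · simp [PySem.List.slice]
  · simp [PySem.List.slice]
  · simp [PySem.List.slice]
  · simp [PySem.List.slice]
  · simp at h; omega

theorem pv_window_len (w : List Char) (h : w.length ≤ 3) (c : Char) :
    (PySem.List.slice (w ++ [c]) (some (-3)) none).length ≤ 3 ∧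
      1 ≤ (PySem.List.slice (w ++ [c]) (some (-3)) none).length ∧
      (PySem.List.slice (w ++ [c]) (some (-3)) none).getLast? = some c := by
  rcases w with _|⟨a,_|⟨b,_|⟨d,_|⟨e,w⟩⟩⟩⟩
  · simp [PySem.List.slice]
  · simp [PySem.List.slice]
  · simp [PySem.List.slice]
  · simp [PySem.List.slice]
  · simp at h; omega

theorem pv_toggle_eq (w : List Char) (h1 : 1 ≤ w.length) (h3 : w.length ≤ 3) :
    ((PySem.Chars.lower w = "on".toList ∨
        PySem.Chars.lower (PySem.List.slice w (some 1) (some 3)) = "on".toList) ↔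
      PySem.Chars.endswith (PySem.Chars.lower w) "on".toList = true) := by
  rcases w with _|⟨a,_|⟨b,_|⟨d,_|⟨e,w⟩⟩⟩⟩
  · simp at h1
  · simp [PySem.List.slice, PySem.Chars.lower, PySem.Chars.endswith,
      List.isSuffixOf, List.isPrefixOf]
  · simp [PySem.List.slice, PySem.Chars.lower, PySem.Chars.endswith,
      List.isSuffixOf, List.isPrefixOf]
    constructor <;> (rintro ⟨x,y⟩; exact ⟨y.symm, x.symm⟩)
  · simp [PySem.List.slice, PySem.Chars.lower, PySem.Chars.endswith,
      List.isSuffixOf, List.isPrefixOf]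
    constructor <;> (rintro ⟨x,y⟩; exact ⟨y.symm, x.symm⟩)
  · simp at h3; omega

theorem pv_off_last (w : List Char) (c : Char) (hl : w.getLast? = some c)
    (hoff : PySem.Chars.lower w = "off".toList) : PySem.Chars.lowerChar c = 'f' := by
  have h : (PySem.Chars.lower w).getLast? = some 'f' := by rw [hoff]; rfl
  rw [show PySem.Chars.lower w = w.map PySem.Chars.lowerChar from rfl] at h
  rw [List.getLast?_map, hl] at h
  simpa using h

theorem pv_digit_lower (c : Char) (hd : PySem.Chars.isdigit c = true) :
    PySem.Chars.lowerChar c ≠ 'f' := by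
  simp [PySem.Chars.isdigit] at hd
  obtain ⟨h1, h2⟩ := hd
  have h1' : (48:Nat) ≤ c.toNat := h1
  have h2' : c.toNat ≤ (57:Nat) := h2
  have hu : PySem.Chars.isupper c = false := by
    simp [PySem.Chars.isupper]
    intro h
    have h' : (65:Nat) ≤ c.toNat := h
    exfalso; omega
  simp [PySem.Chars.lowerChar, hu]
  intro h
  have hv : c.toNat = 102 := by rw [h]; rfl
  omega

theorem pv_isdigit_eq_sign : PySem.Chars.isdigit '=' = false := by decide

theorem pv_step (a : List String × Nat × Bool × List Char)
    (b : List String × String × Bool × List Char) (c : Char) (h : PvRel a b) :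
    PvRel (parseStepA a c) (pvStepM b c) := by
  obtain ⟨ns, i, stA, wA⟩ := a
  obtain ⟨out, cur, st, w⟩ := b
  obtain ⟨e1, e2, e3, e4, e5, e6⟩ := h
  simp only at e1 e2 e3 e4 e5 e6
  subst e1; subst e2; subst e3; subst e4
  have hw := pv_window_eq wA e5 c
  have hl := pv_window_len wA e5 c
  have hoff : PySem.Chars.lower (PySem.List.slice (wA ++ [c]) (some (-3)) none) = "off".toList →
      PySem.Chars.isdigit c = false := by
    intro ho
    by_contra hdd
    exact pv_digit_lower c (by simpa using hdd) (pv_off_last _ c hl.2.2 ho)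
  unfold PvRel
  simp only [parseStepA, pvStepM, hw]
  refine ⟨?_, ?_, ?_, ?_, ?_, ?_⟩
  · -- token lists
    by_cases hst : stA = true
    · by_cases hd : PySem.Chars.isdigit c
      · by_cases hcur : cur = ""
        · subst hcur
          simp [hst, hd, List.getD]
        · simp [hst, hd, hcur, List.getD]
      · by_cases hcur : cur = ""
        · subst hcur
          by_cases hc : c = '=' <;> simp [hst, hd, hc, pv_isdigit_eq_sign]
        · by_cases hc : c = '=' <;> simp [hst, hd, hc, hcur, pv_isdigit_eq_sign]
    · simp [hst]
  · -- index = length of out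
    by_cases hst : stA = true
    · by_cases hd : PySem.Chars.isdigit c
      · by_cases hcur : cur = ""
        · subst hcur; simp [hst, hd]
        · simp [hst, hd, hcur]
      · by_cases hcur : cur = ""
        · subst hcur
          by_cases hc : c = '=' <;> simp [hst, hd, hc, List.getD, pv_isdigit_eq_sign]
        · by_cases hc : c = '=' <;>
            simp [hst, hd, hc, hcur, List.getD, pv_isdigit_eq_sign]
    · simp [hst]
  · -- states equal
    simp only [pv_toggle_eq _ hl.2.1 hl.1]
  · trivial
  · exact hl.1
  · -- new state false → cur component empty
    intro hst'
    by_cases ho : PySem.Chars.lower (PySem.List.slice (wA ++ [c]) (some (-3)) none) = "off".toList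
    · have hdf := hoff ho
      by_cases hst : stA = true
      · by_cases hcur : cur = "" <;> simp [hst, hdf, hcur]
      · simp [hst, e6 (by simpa using hst)]
    · rw [if_neg ho] at hst'
      by_cases hon : PySem.Chars.endswith
          (PySem.Chars.lower (PySem.List.slice (wA ++ [c]) (some (-3)) none)) "on".toList = true
      · rw [if_pos hon] at hst'; exact absurd hst' (by simp)
      · rw [if_neg hon] at hst'
        have hc0 := e6 hst'
        simp [hst', hc0]

theorem pv_line (cs : List Char) (a : List String × Nat × Bool × List Char)
    (b : List String × String × Bool × List Char) (h : PvRel a b) :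
    PvRel (cs.foldl parseStepA a) (cs.foldl pvStepM b) := by
  induction cs generalizing a b with
  | nil => exact h
  | cons c cs ih => exact ih _ _ (pv_step a b c h)

theorem pv_text (text : List String) (a : List String × Nat × Bool × List Char)
    (b : List String × String × Bool × List Char) (h : PvRel a b) :
    PvRel (text.foldl (fun s line => line.toList.foldl parseStepA s) a)
      (text.foldl (fun s line => line.toList.foldl pvStepM s) b) := by
  induction text generalizing a b with
  | nil => exact h
  | cons l ls ih => exact ih _ _ (pv_line l.toList a b h)

-- A equals the intermediate machine.
theorem pv_parse_eq_M (text : List String) : parse text = pvMResult text := by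
  unfold parse pvMResult
  have h := pv_text text ([], 0, true, []) ([], "", true, []) (by
    unfold PvRel; refine ⟨?_, ?_, ?_, ?_, ?_, ?_⟩ <;> simp)
  obtain ⟨h1, _, _, _, _, _⟩ := h
  rw [h1]
  by_cases hc : (text.foldl (fun s line => line.toList.foldl pvStepM s) ([], "", true, [])).2.1 = "" <;>
    simp [hc]

-- ---- split₀ as a left fold ----

def pvWStep (s : List Char × List (List Char)) (c : Char) : List Char × List (List Char) :=
  if PySem.Chars.isspace c then
    (if s.1.isEmpty then ([], s.2) else ([], s.1.reverse :: s.2))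
  else (c :: s.1, s.2)

def pvWFin (s : List Char × List (List Char)) : List (List Char) :=
  if s.1.isEmpty then s.2.reverse else (s.1.reverse :: s.2).reverse

theorem pv_go_eq_fold (s : List Char) (cur : List Char) (acc : List (List Char)) :
    PySem.Chars.split₀.go s cur acc = pvWFin (s.foldl pvWStep (cur, acc)) := by
  induction s generalizing cur acc with
  | nil => simp [PySem.Chars.split₀.go, pvWFin]
  | cons c rest ih =>
    rw [PySem.Chars.split₀.go]
    by_cases hs : PySem.Chars.isspace c = true
    · by_cases he : cur.isEmpty <;>
        simp [hs, he, pvWStep, ih]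
    · simp [hs, pvWStep, ih]

theorem pv_split_eq_fold (s : List Char) :
    PySem.Chars.split₀ s = pvWFin (s.foldl pvWStep ([], [])) := by
  rw [show PySem.Chars.split₀ s = PySem.Chars.split₀.go s [] [] from rfl, pv_go_eq_fold]

-- ---- relation between the intermediate machine and B's pass-1 machine ----

-- on/window components agree; the word-fold over the masked kept characters mirrors (out, cur).
def PvRel2 (m : List String × String × Bool × List Char) (k : List Char × Bool × List Char) : Prop :=
  m.2.2.1 = k.2.1 ∧ m.2.2.2 = k.2.2 ∧
  (k.1.flatMap parseMask1).foldl pvWStep ([], []) =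
    (m.2.1.toList.reverse, (m.1.map String.toList).reverse)

theorem pv_space_not : PySem.Chars.isspace ' ' = true ∧ PySem.Chars.isspace '=' = false := by decide

theorem pv_digit_not_space (c : Char) (hd : PySem.Chars.isdigit c = true) :
    PySem.Chars.isspace c = false := by
  simp [PySem.Chars.isdigit] at hd
  obtain ⟨h1, h2⟩ := hd
  have h1' : (48:Nat) ≤ c.toNat := h1
  have h2' : c.toNat ≤ (57:Nat) := h2
  simp [PySem.Chars.isspace]
  omega

theorem pv_step2 (m : List String × String × Bool × List Char)
    (k : List Char × Bool × List Char) (c : Char) (h : PvRel2 m k) :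
    PvRel2 (pvStepM m c) (parseStepK k c) := by
  obtain ⟨out, cur, st, w⟩ := m
  obtain ⟨kept, on, wk⟩ := k
  obtain ⟨e1, e2, e3⟩ := h
  simp only at e1 e2 e3
  subst e1; subst e2
  unfold PvRel2
  refine ⟨rfl, rfl, ?_⟩
  simp only [pvStepM, parseStepK]
  by_cases hst : st = true
  · simp only [hst, if_true]
    by_cases hd : PySem.Chars.isdigit c
    · -- digit: chunk [c], extends cur
      have hne : c ≠ '=' := by intro h; subst h; exact absurd hd (by decide)
      simp [hd, hne, List.foldl_append, e3, parseMask1, pvWStep, pv_digit_not_space c hd]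
    · by_cases hc : c = '='
      · -- '=' : chunk " = " flushes cur and pushes "="
        subst hc
        by_cases hcur : cur = "" <;>
          simp [hd, hcur, List.foldl_append, e3, parseMask1, pvWStep, pv_space_not.1,
            pv_space_not.2, String.toList_eq_nil_iff]
      · -- other non-digit: chunk [' '] flushes cur
        by_cases hcur : cur = "" <;>
          simp [hd, hc, hcur, List.foldl_append, e3, parseMask1, pvWStep, pv_space_not.1,
            String.toList_eq_nil_iff]
  · simp [hst, e3]

theorem pv_chars2 (cs : List Char) (m : List String × String × Bool × List Char)
    (k : List Char × Bool × List Char) (h : PvRel2 m k) :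
    PvRel2 (cs.foldl pvStepM m) (cs.foldl parseStepK k) := by
  induction cs generalizing m k with
  | nil => exact h
  | cons c cs ih => exact ih _ _ (pv_step2 m k c h)

theorem pv_fold_flat (text : List String) (m : List String × String × Bool × List Char) :
    text.foldl (fun s line => line.toList.foldl pvStepM s) m =
      (text.flatMap String.toList).foldl pvStepM m := by
  induction text generalizing m with
  | nil => rfl
  | cons l ls ih => simp [List.flatMap_cons, List.foldl_append, ih]

-- ===== VERDICT (by name: the statement is the Claim_ definition above) =====
theorem parse_spec : Claim_equal_parse := by
  intro text _
  unfold Spec_parse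
  rw [pv_parse_eq_M]
  unfold pvMResult parse_alt
  rw [pv_fold_flat]
  have h := pv_chars2 (text.flatMap String.toList) ([], "", true, []) ([], true, [])
    (by unfold PvRel2; refine ⟨rfl, rfl, ?_⟩; simp)
  obtain ⟨_, _, e3⟩ := h
  simp only [pv_split_eq_fold, e3]
  by_cases hc : ((text.flatMap String.toList).foldl pvStepM ([], "", true, [])).2.1 = ""
  · simp [hc, pvWFin, Function.comp_def]
  · simp [hc, pvWFin, String.toList_eq_nil_iff, Function.comp_def]
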